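-- pv_equiv track=rewrite | github.com/le0lik/python_beginner | lesson_4-6b.py | my_iterator
-- ===== SOURCE A (Python) =====
-- from itertools import cycle
--
-- def my_iterator(orig, cnt):
--     """
--     Возвращает итератор повторяющий значения из списка <orig> <cnt> раз
--
--     :param orig: list
--     :param cnt: int
--     :return: iterator
--     """
--     c = 0
--     for i in cycle(orig):
--         c += 1
--         if c > cnt:
--             return
--         else:
--             yield i
-- ===== SOURCE B (Python) =====
-- def my_iterator(orig, cnt):
--     # Build the output in two block stages: whole copies of orig, then a prefix.
--     if not orig or cnt <= 0:
--         return
--     q, r = divmod(cnt, len(orig))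
--     yield from orig * q
--     yield from orig[:r]
-- ===== Notes on version B (the rewrite author's own statement) =====
-- stated objective: alternative
-- what changed: B never walks element-by-element through a cycle: it computes q, r = divmod(cnt, len(orig)) once and emits q whole copies of the list (orig * q) followed by the prefix orig[:r], replacing A's infinite cycle iterator with a per-element break counter.
import Mathlib
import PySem

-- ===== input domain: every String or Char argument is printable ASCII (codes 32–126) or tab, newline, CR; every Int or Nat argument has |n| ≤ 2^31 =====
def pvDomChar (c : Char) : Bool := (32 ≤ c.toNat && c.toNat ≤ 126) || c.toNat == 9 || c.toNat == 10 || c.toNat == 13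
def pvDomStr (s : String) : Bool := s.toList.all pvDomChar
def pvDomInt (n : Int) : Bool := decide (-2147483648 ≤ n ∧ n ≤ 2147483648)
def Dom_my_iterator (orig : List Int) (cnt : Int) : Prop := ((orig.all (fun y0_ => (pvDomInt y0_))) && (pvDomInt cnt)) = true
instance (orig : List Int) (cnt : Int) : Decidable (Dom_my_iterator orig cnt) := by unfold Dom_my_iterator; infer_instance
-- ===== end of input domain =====

-- B builds the result in two block stages — q = cnt // len(orig) whole copies of the list,
-- then the prefix orig[:cnt % len(orig)] — instead of A's per-element walk over an infinite
-- cycle iterator with a break counter; objective: alternative.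

-- ===== PORT A =====
-- A iterates over cycle(orig) incrementing c until c > cnt; each loop iteration yields one
-- element, so the loop runs cnt.toNat yield-iterations. `rest` is the not-yet-consumed tail
-- of the current pass of cycle; when empty, cycle refills it with orig.
def myIterGo (orig : List Int) : List Int → Nat → List Int
  | _, 0 => []
  | rest, n+1 =>
    match (if rest.isEmpty then orig else rest) with
    | [] => []
    | x :: xs => x :: myIterGo orig xs n

def my_iterator (orig : List Int) (cnt : Int) : List Int :=
  myIterGo orig orig cnt.toNat

-- ===== PORT B =====
-- q, r = divmod(cnt, len(orig)); yield from orig * q; yield from orig[:r].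
-- Here q ≥ 0 (cnt > 0), so 'orig * q' is List.replicate q.toNat orig flattened.
def my_iterator_alt (orig : List Int) (cnt : Int) : List Int :=
  if orig = [] ∨ cnt ≤ 0 then []
  else
    let n : Int := PySem.List.len orig
    let q : Int := PySem.Int.floordiv cnt n
    let r : Int := PySem.Int.mod cnt n
    (List.replicate q.toNat orig).flatten ++ PySem.List.slice orig none (some r)

-- ===== PRECONDITION & SPEC =====
def Spec_my_iterator (orig : List Int) (cnt : Int) (out : List Int) : Prop := out = my_iterator_alt orig cnt
instance (orig : List Int) (cnt : Int) (out : List Int) : Decidable (Spec_my_iterator orig cnt out) := by unfold Spec_my_iterator; infer_instance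

-- ===== CLAIM (what is proved, stated in full; the proofs are below) =====
def Claim_equal_my_iterator : Prop := ∀ (orig : List Int) (cnt : Int), Dom_my_iterator orig cnt → Spec_my_iterator orig cnt (my_iterator orig cnt)

-- ===== LEMMAS AND PROOFS =====

-- the cycle with an exhausted pass behaves like a fresh pass
theorem myIterGo_empty (orig : List Int) (m : Nat) :
    myIterGo orig [] m = myIterGo orig orig m := by
  cases m with
  | zero => rfl
  | succ k =>
    cases orig with
    | nil => rfl
    | cons x xs => rfl

-- consuming exactly the current pass emits it and restarts the cycle
theorem myIterGo_chunk (orig : List Int) :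
    ∀ (rest : List Int) (m : Nat),
      myIterGo orig rest (rest.length + m) = rest ++ myIterGo orig [] m := by
  intro rest
  induction rest with
  | nil => intro m; simp [myIterGo_empty]
  | cons x xs ih =>
    intro m
    have h : (x :: xs).length + m = (xs.length + m) + 1 := by simp; omega
    rw [h]
    show x :: myIterGo orig xs (xs.length + m) = x :: (xs ++ myIterGo orig [] m)
    rw [ih m]

-- fewer steps than the current pass: a prefix of it
theorem myIterGo_take (orig : List Int) :
    ∀ (rest : List Int) (m : Nat), m ≤ rest.length →
      myIterGo orig rest m = rest.take m := by
  intro rest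
  induction rest with
  | nil =>
    intro m hm
    simp only [List.length_nil, Nat.le_zero] at hm
    subst hm; rfl
  | cons x xs ih =>
    intro m hm
    cases m with
    | zero => rfl
    | succ k =>
      show x :: myIterGo orig xs k = x :: xs.take k
      rw [ih k (by simpa using hm)]

-- A's loop in block form
theorem myIterGo_blocks (orig : List Int) (h : orig ≠ []) :
    ∀ (m : Nat), myIterGo orig orig m =
      (List.replicate (m / orig.length) orig).flatten ++ orig.take (m % orig.length) := by
  intro m
  induction m using Nat.strong_induction_on with
  | _ m ih =>
    have hn : 0 < orig.length := List.length_pos_iff.mpr h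
    by_cases hm : m < orig.length
    · rw [Nat.div_eq_of_lt hm, Nat.mod_eq_of_lt hm]
      simp [myIterGo_take orig orig m (le_of_lt hm)]
    · push Not at hm
      have hsplit : m = orig.length + (m - orig.length) := by omega
      conv_lhs => rw [hsplit]
      rw [myIterGo_chunk orig orig (m - orig.length), myIterGo_empty,
          ih (m - orig.length) (by omega)]
      rw [Nat.div_eq_sub_div hn hm, Nat.mod_eq_sub_mod hm]
      rw [List.replicate_succ, List.flatten_cons, List.append_assoc]

-- ===== VERDICT (by name: the statement is the Claim_ definition above) =====
theorem my_iterator_spec : Claim_equal_my_iterator := by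
  intro orig cnt _
  unfold Spec_my_iterator my_iterator my_iterator_alt
  by_cases h : orig = [] ∨ cnt ≤ 0
  · rw [if_pos h]
    rcases h with h | h
    · subst h
      cases cnt.toNat <;> rfl
    · have : cnt.toNat = 0 := by omega
      rw [this]; rfl
  · rw [if_neg h]
    push Not at h
    obtain ⟨hne, hpos⟩ := h
    have hc : cnt = (cnt.toNat : Int) := by omega
    rw [myIterGo_blocks orig hne cnt.toNat]
    simp only [PySem.List.len_eq]
    rw [hc, PySem.Int.floordiv_natCast, PySem.Int.mod_natCast,
        PySem.List.slice_to_natCast]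
    simp only [Int.toNat_natCast]
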